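-- pv_equiv track=rewrite | github.com/pb24t7s/mobile-c2-railway | c2_server.py | check_role_based_email
-- ===== SOURCE A (Python) =====
-- def check_role_based_email(email):
--     """Check if email is role-based (not personal)"""
--     username = email.split('@')[0].lower()
--     role_based_prefixes = [
--         'admin', 'support', 'info', 'contact', 'sales', 'marketing',
--         'noreply', 'no-reply', 'help', 'service', 'team', 'office',
--         'hr', 'recruiting', 'billing', 'accounts', 'legal'
--     ]
--
--     return any(prefix in username for prefix in role_based_prefixes)
-- ===== SOURCE B (Python) =====
-- _ROLE_PREFIXES = (
--     'admin', 'support', 'info', 'contact', 'sales', 'marketing',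
--     'noreply', 'no-reply', 'help', 'service', 'team', 'office',
--     'hr', 'recruiting', 'billing', 'accounts', 'legal'
-- )
--
-- def check_role_based_email(email):
--     """Check if email is role-based (not personal)"""
--     username = email.split('@')[0].lower()
--     # single left-to-right pass: at each position, test whether any
--     # role prefix starts exactly there
--     for i in range(len(username)):
--         for p in _ROLE_PREFIXES:
--             if username.startswith(p, i):
--                 return True
--     return False
-- ===== Notes on version B (the rewrite author's own statement) =====
-- stated objective: alternative
-- what changed: A scans the username once per role prefix (17 independent substring searches); B makes a single position-major left-to-right pass, testing at each index whether any prefix starts there.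
import Mathlib
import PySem

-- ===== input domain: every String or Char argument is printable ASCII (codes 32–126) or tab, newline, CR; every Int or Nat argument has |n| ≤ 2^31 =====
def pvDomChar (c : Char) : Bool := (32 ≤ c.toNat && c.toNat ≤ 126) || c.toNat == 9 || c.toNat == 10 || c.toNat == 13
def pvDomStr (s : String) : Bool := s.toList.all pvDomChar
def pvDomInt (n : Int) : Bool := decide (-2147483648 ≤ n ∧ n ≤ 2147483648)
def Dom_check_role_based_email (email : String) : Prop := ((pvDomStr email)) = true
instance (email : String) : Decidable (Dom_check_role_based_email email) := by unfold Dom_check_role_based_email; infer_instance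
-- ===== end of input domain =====

-- B replaces A's 17 independent substring scans by one position-major pass over the
-- username, testing at each index whether any role prefix starts there (alternative,
-- same cost; return value proved identical on all inputs).

-- ===== PORT A =====
def roleBasedPrefixes : List String :=
  ["admin", "support", "info", "contact", "sales", "marketing",
   "noreply", "no-reply", "help", "service", "team", "office",
   "hr", "recruiting", "billing", "accounts", "legal"]

def check_role_based_email (email : String) : Bool :=
  let username := PySem.Str.lower (((PySem.Str.split? email "@").getD []).headD "")
  roleBasedPrefixes.any (fun prefix_ => PySem.Str.isIn prefix_ username)

-- ===== PORT B =====
-- Source B's outer loop 'for i in range(len(username))' with 'username.startswith(p, i)'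
-- is transcribed as structural recursion over the suffixes of the username's char list.
def pvScanPositions (ps : List String) : List Char → Bool
  | [] => false
  | c :: rest =>
      (ps.any (fun p => PySem.Chars.startswith (c :: rest) p.toList)) || pvScanPositions ps rest

def check_role_based_email_alt (email : String) : Bool :=
  let username := PySem.Str.lower (((PySem.Str.split? email "@").getD []).headD "")
  pvScanPositions roleBasedPrefixes username.toList

-- ===== PRECONDITION & SPEC =====
def Spec_check_role_based_email (email : String) (out : Bool) : Prop := out = check_role_based_email_alt email
instance (email : String) (out : Bool) : Decidable (Spec_check_role_based_email email out) := by unfold Spec_check_role_based_email; infer_instance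

-- ===== CLAIM (what is proved, stated in full; the proofs are below) =====
def Claim_equal_check_role_based_email : Prop := ∀ (email : String), Dom_check_role_based_email email → Spec_check_role_based_email email (check_role_based_email email)

-- ===== LEMMAS AND PROOFS =====

-- the position-major scan finds exactly the prefixes that occur as an infix
-- (for nonempty prefixes; all 17 role prefixes are nonempty)
theorem pvScanPositions_iff (ps : List String) (h : ∀ p ∈ ps, p.toList ≠ [])
    (s : List Char) : pvScanPositions ps s = true ↔ ∃ p ∈ ps, p.toList <:+: s := by
  induction s with
  | nil =>
      simp only [pvScanPositions]
      constructor
      · intro hfalse; cases hfalse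
      rintro ⟨p, hp, hinf⟩
      exact absurd (List.eq_nil_of_infix_nil hinf) (h p hp)
  | cons c rest ih =>
      simp only [pvScanPositions, Bool.or_eq_true, List.any_eq_true,
        PySem.Chars.startswith_iff, ih, List.infix_cons_iff]
      constructor
      · rintro (⟨p, hp, hpre⟩ | ⟨p, hp, hinf⟩)
        · exact ⟨p, hp, Or.inl hpre⟩
        · exact ⟨p, hp, Or.inr hinf⟩
      · rintro ⟨p, hp, hpre | hinf⟩
        · exact Or.inl ⟨p, hp, hpre⟩
        · exact Or.inr ⟨p, hp, hinf⟩

theorem pvPrefixes_nonempty : ∀ p ∈ roleBasedPrefixes, p.toList ≠ [] := by decide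

-- ===== VERDICT (by name: the statement is the Claim_ definition above) =====
theorem check_role_based_email_spec : Claim_equal_check_role_based_email := by
  intro email _
  unfold Spec_check_role_based_email check_role_based_email check_role_based_email_alt
  set u := PySem.Str.lower (((PySem.Str.split? email "@").getD []).headD "") with hu
  rw [Bool.eq_iff_iff]
  rw [pvScanPositions_iff roleBasedPrefixes pvPrefixes_nonempty u.toList]
  simp [List.any_eq_true, PySem.Chars.isIn_iff_infix]
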